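-- pv_equiv track=rewrite | github.com/bjarkemoensted/adventofcode | aoc/aoc_2016/solution22.py | get_viable_pairs
-- ===== SOURCE A (Python) =====
-- def _iterate_crd_and_vals(arr: list|tuple):
--     """Given a 2d array, iterates over coordinate, value pairs like (i, j), val."""
--     for i, row in enumerate(arr):
--         for j, val in enumerate(row):
--             yield (i, j), val
--
-- def get_viable_pairs(used_arr, size_arr):
--     """Takes arrays representing used and total space at each node.
--     Returns a list of pairs of coordinates [((i1, j1), (i2, j2)), ...] representing 'viable pairs' of nodes.
--     Nodes that are not viable are the 'wall nodes'."""
--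
--     res = []
--     for crd_a, used_a in _iterate_crd_and_vals(used_arr):
--         for crd_b, used_b in _iterate_crd_and_vals(used_arr):
--             ib, jb = crd_b
--             avail = size_arr[ib][jb] - used_b
--             if crd_a == crd_b:
--                 continue
--             if used_a == 0:
--                 continue
--             fits = used_a <= avail
--             if fits:
--                 res.append((crd_a, crd_b))
--             #
--         #
--
--     return res
-- ===== SOURCE B (Python) =====
-- def get_viable_pairs(used_arr, size_arr):
--     # Flatten once; cache the row-major list of fitting destinations per distinct used value,
--     # so the inner scan over all nodes runs once per distinct value instead of once per node.
--     cells = [((i, j), u) for i, row in enumerate(used_arr) for j, u in enumerate(row)]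
--     avails = [(crd, size_arr[crd[0]][crd[1]] - u) for crd, u in cells]
--     fits_memo = {}
--     res = []
--     for crd_a, u in cells:
--         if u == 0:
--             continue
--         if u not in fits_memo:
--             fits_memo[u] = [crd for crd, av in avails if u <= av]
--         res.extend((crd_a, b) for b in fits_memo[u] if b != crd_a)
--     return res
-- ===== Notes on version B (the rewrite author's own statement) =====
-- stated objective: alternative
-- what changed: B flattens the grid once, precomputes each node's available space in one pass, and caches the row-major list of fitting destination coordinates per distinct used value in a dict, so the inner scan over all nodes runs once per distinct used value instead of once per source node; A re-walks the nested generator and re-indexes size_arr for every (a,b) pair.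
import Mathlib
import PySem

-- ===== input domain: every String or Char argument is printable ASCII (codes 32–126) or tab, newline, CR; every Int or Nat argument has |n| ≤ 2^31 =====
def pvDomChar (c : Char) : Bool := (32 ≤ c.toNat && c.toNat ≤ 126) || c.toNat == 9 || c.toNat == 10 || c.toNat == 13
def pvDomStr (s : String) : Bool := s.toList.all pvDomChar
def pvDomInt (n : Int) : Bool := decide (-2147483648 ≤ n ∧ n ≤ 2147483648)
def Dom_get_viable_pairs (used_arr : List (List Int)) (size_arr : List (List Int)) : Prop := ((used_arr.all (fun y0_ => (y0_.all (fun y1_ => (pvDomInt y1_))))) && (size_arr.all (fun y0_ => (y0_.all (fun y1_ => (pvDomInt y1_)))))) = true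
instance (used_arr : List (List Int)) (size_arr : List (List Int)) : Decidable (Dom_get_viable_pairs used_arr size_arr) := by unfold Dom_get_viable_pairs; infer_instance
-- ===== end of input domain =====

-- B flattens the grid once and caches, per distinct used value, the row-major list of
-- fitting destinations, so the inner scan runs once per distinct value, not once per node
-- (objective: alternative/constant-factor; equivalence of return values).

-- ===== PORT A =====
-- _iterate_crd_and_vals: yields ((i, j), val) over a 2d array
def pvIterCV (arr : List (List Int)) : List ((Int × Int) × Int) :=
  (PySem.List.enumerate arr 0).flatMap (fun p =>
    (PySem.List.enumerate p.2 0).map (fun q => ((p.1, q.1), q.2)))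

def get_viable_pairs (used_arr : List (List Int)) (size_arr : List (List Int)) : List ((Int × Int) × (Int × Int)) :=
  (pvIterCV used_arr).foldl
    (fun res a =>
      (pvIterCV used_arr).foldl
        (fun res b =>
          -- avail = size_arr[ib][jb] - used_b  (in-range under Pre_; pyGetD is exact there)
          let avail := PySem.List.pyGetD (PySem.List.pyGetD size_arr b.1.1 []) b.1.2 0 - b.2
          if a.1 = b.1 then res
          else if a.2 = 0 then res
          else if a.2 ≤ avail then res ++ [(a.1, b.1)] else res)
        res)
    []

-- ===== PORT B =====
def get_viable_pairs_alt (used_arr : List (List Int)) (size_arr : List (List Int)) : List ((Int × Int) × (Int × Int)) :=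
  let cells : List ((Int × Int) × Int) :=
    (PySem.List.enumerate used_arr 0).flatMap (fun p =>
      (PySem.List.enumerate p.2 0).map (fun q => ((p.1, q.1), q.2)))
  let avails : List ((Int × Int) × Int) :=
    cells.map (fun c => (c.1, PySem.List.pyGetD (PySem.List.pyGetD size_arr c.1.1 []) c.1.2 0 - c.2))
  let st :=
    cells.foldl
      (fun (st : PySem.Dict Int (List (Int × Int)) × List ((Int × Int) × (Int × Int))) c =>
        if c.2 = 0 then st
        else
          let memo := if st.1.contains c.2 then st.1
                      else st.1.insert c.2 ((avails.filter (fun x => c.2 ≤ x.2)).map (fun x => x.1))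
          (memo, st.2 ++ ((memo.getD c.2 []).filter (fun b => b != c.1)).map (fun b => (c.1, b))))
      (PySem.Dict.empty, [])
  st.2

-- ===== PRECONDITION & SPEC =====
-- Pre_ excludes exactly the inputs where Python A raises IndexError: some occupied cell of
-- used_arr has a coordinate out of range for size_arr. Nothing A returns on is excluded.
def Pre_get_viable_pairs (used_arr : List (List Int)) (size_arr : List (List Int)) : Prop :=
  ∀ i, i < used_arr.length → (used_arr[i]! = [] ∨
    (i < size_arr.length ∧ used_arr[i]!.length ≤ size_arr[i]!.length))
instance (used_arr : List (List Int)) (size_arr : List (List Int)) : Decidable (Pre_get_viable_pairs used_arr size_arr) := by unfold Pre_get_viable_pairs; infer_instance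
def pvWitness_get_viable_pairs : List (List Int) × List (List Int) := ([[1], [0, 2]], [[3], [2, 3]])

def Spec_get_viable_pairs (used_arr : List (List Int)) (size_arr : List (List Int)) (out : List ((Int × Int) × (Int × Int))) : Prop := out = get_viable_pairs_alt used_arr size_arr
instance (used_arr : List (List Int)) (size_arr : List (List Int)) (out : List ((Int × Int) × (Int × Int))) : Decidable (Spec_get_viable_pairs used_arr size_arr out) := by unfold Spec_get_viable_pairs; infer_instance

-- ===== CLAIM (what is proved, stated in full; the proofs are below) =====
def Claim_equal_get_viable_pairs : Prop := ∀ (used_arr : List (List Int)) (size_arr : List (List Int)), Dom_get_viable_pairs used_arr size_arr → Pre_get_viable_pairs used_arr size_arr → Spec_get_viable_pairs used_arr size_arr (get_viable_pairs used_arr size_arr)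

-- ===== LEMMAS AND PROOFS =====

-- avail of a cell
def pvAvail (size_arr : List (List Int)) (c : (Int × Int) × Int) : Int :=
  PySem.List.pyGetD (PySem.List.pyGetD size_arr c.1.1 []) c.1.2 0 - c.2

-- B's cached fit list for a used value u
def pvFits (size_arr : List (List Int)) (cells : List ((Int × Int) × Int)) (u : Int) : List (Int × Int) :=
  ((cells.map (fun c => (c.1, pvAvail size_arr c))).filter (fun x => decide (u ≤ x.2))).map (fun x => x.1)

-- common normal form of both programs
def pvCanon (size_arr : List (List Int)) (cells : List ((Int × Int) × Int)) : List ((Int × Int) × (Int × Int)) :=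
  cells.flatMap (fun c =>
    if c.2 = 0 then []
    else ((pvFits size_arr cells c.2).filter (fun b => b != c.1)).map (fun b => (c.1, b)))

lemma pv_flatMap_ite_singleton {α β : Type} (l : List α) (p : α → Prop) [DecidablePred p] (f : α → β) :
    l.flatMap (fun x => if p x then [f x] else []) = (l.filter (fun x => decide (p x))).map f := by
  induction l with
  | nil => simp
  | cons x xs ih => by_cases h : p x <;> simp [h, ih]

lemma pvA_eq_canon (used_arr size_arr : List (List Int)) :
    get_viable_pairs used_arr size_arr = pvCanon size_arr (pvIterCV used_arr) := by
  unfold get_viable_pairs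
  have houter : (fun (res : List ((Int × Int) × (Int × Int))) (a : (Int × Int) × Int) =>
      (pvIterCV used_arr).foldl
        (fun res b =>
          let avail := PySem.List.pyGetD (PySem.List.pyGetD size_arr b.1.1 []) b.1.2 0 - b.2
          if a.1 = b.1 then res
          else if a.2 = 0 then res
          else if a.2 ≤ avail then res ++ [(a.1, b.1)] else res)
        res)
      = fun res a => res ++ (pvIterCV used_arr).flatMap (fun b =>
          if a.1 = b.1 then []
          else if a.2 = 0 then []
          else if a.2 ≤ pvAvail size_arr b then [(a.1, b.1)] else []) := by
    funext res a
    have hstep : (fun (res : List ((Int × Int) × (Int × Int))) (b : (Int × Int) × Int) =>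
        let avail := PySem.List.pyGetD (PySem.List.pyGetD size_arr b.1.1 []) b.1.2 0 - b.2
        if a.1 = b.1 then res
        else if a.2 = 0 then res
        else if a.2 ≤ avail then res ++ [(a.1, b.1)] else res)
        = fun res b => res ++ (if a.1 = b.1 then []
            else if a.2 = 0 then []
            else if a.2 ≤ pvAvail size_arr b then [(a.1, b.1)] else []) := by
      funext res b
      simp only [pvAvail]
      split_ifs <;> simp
    rw [hstep, PySem.List.foldl_append_eq_flatMap]
  rw [houter, PySem.List.foldl_append_eq_flatMap, List.nil_append, pvCanon]
  have hpt : ∀ a : (Int × Int) × Int,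
      (pvIterCV used_arr).flatMap (fun b =>
          if a.1 = b.1 then []
          else if a.2 = 0 then []
          else if a.2 ≤ pvAvail size_arr b then [(a.1, b.1)] else [])
      = (if a.2 = 0 then []
         else ((pvFits size_arr (pvIterCV used_arr) a.2).filter (fun b => b != a.1)).map (fun b => (a.1, b))) := by
    intro a
    by_cases h0 : a.2 = 0
    · simp [h0]
    · simp only [h0, if_false]
      have hfn : (fun (b : (Int × Int) × Int) =>
          if a.1 = b.1 then []
          else if a.2 ≤ pvAvail size_arr b then [(a.1, b.1)] else [])
          = fun b => if (a.1 ≠ b.1 ∧ a.2 ≤ pvAvail size_arr b) then [(a.1, b.1)] else ([] : List ((Int × Int) × (Int × Int))) := by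
        funext b
        split_ifs with h1 h2 h3 <;> simp_all
      rw [hfn, pv_flatMap_ite_singleton]
      simp only [pvFits, List.filter_map, List.map_map]
      rw [List.filter_filter]
      have : (fun (x : (Int × Int) × Int) => decide (a.1 ≠ x.1 ∧ a.2 ≤ pvAvail size_arr x))
          = fun x => ((x.1, pvAvail size_arr x).1 != a.1 && decide (a.2 ≤ ((x.1, pvAvail size_arr x) : (Int × Int) × Int).2)) := by
        funext x
        simp [bne, beq_eq_decide, eq_comm]
      rw [this]
      simp [Function.comp]
  simp only [hpt]

lemma pvFoldB (used_arr size_arr : List (List Int)) :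
    ∀ (cs : List ((Int × Int) × Int)) (memo : PySem.Dict Int (List (Int × Int))) (res : List ((Int × Int) × (Int × Int))),
    (∀ u, memo.contains u = true → memo.getD u [] = pvFits size_arr (pvIterCV used_arr) u) →
    (cs.foldl
      (fun (st : PySem.Dict Int (List (Int × Int)) × List ((Int × Int) × (Int × Int))) c =>
        if c.2 = 0 then st
        else
          let memo := if st.1.contains c.2 then st.1
                      else st.1.insert c.2 ((((pvIterCV used_arr).map (fun c => (c.1, PySem.List.pyGetD (PySem.List.pyGetD size_arr c.1.1 []) c.1.2 0 - c.2))).filter (fun x => c.2 ≤ x.2)).map (fun x => x.1))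
          (memo, st.2 ++ ((memo.getD c.2 []).filter (fun b => b != c.1)).map (fun b => (c.1, b))))
      (memo, res)).2
    = res ++ cs.flatMap (fun c =>
        if c.2 = 0 then []
        else ((pvFits size_arr (pvIterCV used_arr) c.2).filter (fun b => b != c.1)).map (fun b => (c.1, b))) := by
  intro cs
  induction cs with
  | nil => intro memo res _; simp
  | cons c cs ih =>
    intro memo res hinv
    by_cases h0 : c.2 = 0
    · simp only [List.foldl_cons, h0, if_true, List.flatMap_cons]
      rw [ih memo res hinv]
      simp
    · by_cases hc : memo.contains c.2
      · simp only [List.foldl_cons, if_neg h0, hc, if_true]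
        rw [ih memo _ hinv, hinv c.2 hc]
        simp [h0, List.append_assoc]
      · have hV : (((pvIterCV used_arr).map (fun c => (c.1, PySem.List.pyGetD (PySem.List.pyGetD size_arr c.1.1 []) c.1.2 0 - c.2))).filter (fun x => c.2 ≤ x.2)).map (fun x => x.1)
            = pvFits size_arr (pvIterCV used_arr) c.2 := rfl
        simp only [List.foldl_cons, if_neg h0, hc, if_false, Bool.false_eq_true]
        have hinv' : ∀ u, (memo.insert c.2 (pvFits size_arr (pvIterCV used_arr) c.2)).contains u = true →
            (memo.insert c.2 (pvFits size_arr (pvIterCV used_arr) c.2)).getD u [] = pvFits size_arr (pvIterCV used_arr) u := by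
          intro u hu
          rw [PySem.Dict.getD_insert]
          by_cases he : u = c.2
          · simp [he]
          · simp only [if_neg he]
            apply hinv
            rw [PySem.Dict.contains_insert] at hu
            simpa [he] using hu
        rw [hV, ih _ _ hinv', PySem.Dict.getD_insert_self]
        simp [h0, List.append_assoc]

lemma pvB_eq_canon (used_arr size_arr : List (List Int)) :
    get_viable_pairs_alt used_arr size_arr = pvCanon size_arr (pvIterCV used_arr) := by
  have h := pvFoldB used_arr size_arr (pvIterCV used_arr) PySem.Dict.empty []
    (by intro u hu; simp [PySem.Dict.contains_empty] at hu)
  exact h.trans (by simp [pvCanon])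

-- ===== VERDICT (by name: the statement is the Claim_ definition above) =====
theorem get_viable_pairs_spec : Claim_equal_get_viable_pairs := by
  intro used_arr size_arr _ _
  unfold Spec_get_viable_pairs
  rw [pvA_eq_canon, pvB_eq_canon]
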